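-- pv_equiv track=rewrite | github.com/gargpushkar/python-codes | subsets_unique.py | get_unique_subsets
-- ===== SOURCE A (Python) =====
-- def get_unique_subsets(input, output, ans_list, hash_map):
--     if len(input) == 0:
--         output_str = "".join(map(str, output))
--         if output_str in hash_map:
--             return
--         hash_map[output_str] = 1
--         ans_list.append(output)
--         return
--     elem = input[0]
--     input = input[1:]
--     output1 = output[::]
--     output2 = output[::]
--     output2.append(elem)
--     get_unique_subsets(input, output1, ans_list, hash_map)
--     get_unique_subsets(input, output2, ans_list, hash_map)
--     return ans_list
-- ===== SOURCE B (Python) =====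
-- def get_unique_subsets(input, output, ans_list, hash_map):
--     # Iterative: expand the subset list left-to-right, then a single dedup pass.
--     subsets = [list(output)]
--     for elem in input:
--         subsets = [s + extra for s in subsets for extra in ([], [elem])]
--     for subset in subsets:
--         key = "".join(map(str, subset))
--         if key not in hash_map:
--             hash_map[key] = 1
--             ans_list.append(subset)
--     return ans_list
-- ===== Notes on version B (the rewrite author's own statement) =====
-- stated objective: alternative
-- what changed: Replaces A's binary recursion (which interleaves generation with dedup via threaded mutable state) by an iterative left-to-right product expansion building the full subset list, followed by one linear dedup pass.
-- outside the precondition, e.g. on get_unique_subsets([], [], [], {}): A returns None, B returns [[]]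
import Mathlib
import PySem

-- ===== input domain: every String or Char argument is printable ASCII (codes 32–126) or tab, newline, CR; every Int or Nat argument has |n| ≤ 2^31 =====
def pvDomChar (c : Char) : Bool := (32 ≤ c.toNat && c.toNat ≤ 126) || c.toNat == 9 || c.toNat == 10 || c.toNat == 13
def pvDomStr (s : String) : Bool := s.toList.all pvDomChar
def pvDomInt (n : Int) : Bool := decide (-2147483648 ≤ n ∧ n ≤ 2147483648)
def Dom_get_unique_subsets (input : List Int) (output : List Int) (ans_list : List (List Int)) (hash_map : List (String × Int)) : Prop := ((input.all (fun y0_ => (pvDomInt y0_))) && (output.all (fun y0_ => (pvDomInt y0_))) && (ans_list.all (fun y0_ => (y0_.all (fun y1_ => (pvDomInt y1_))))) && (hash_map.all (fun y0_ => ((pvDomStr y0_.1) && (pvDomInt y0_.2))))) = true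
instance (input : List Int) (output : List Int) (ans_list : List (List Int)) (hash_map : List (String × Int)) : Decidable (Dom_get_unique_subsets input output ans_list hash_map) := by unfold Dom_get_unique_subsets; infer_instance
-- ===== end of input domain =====

-- B replaces A's recursion by iterative subset-list expansion plus a single dedup pass (objective: alternative).
-- Equivalence is about the RETURN value; both Pythons also mutate ans_list/hash_map identically on Pre_.


-- ===== PORT A =====
-- recursive helper threading the mutable (ans_list, hash_map) state, exactly A's recursion
def pvGoA (input : List Int) (output : List Int) (st : List (List Int) × List (String × Int)) :
    List (List Int) × List (String × Int) :=
  match input with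
  | [] =>
    let output_str := PySem.Str.join "" (output.map PySem.Int.toStr)
    if st.2.any (fun p => p.1 == output_str) then st
    else (st.1 ++ [output], st.2 ++ [(output_str, 1)])
  | elem :: rest =>
    let output1 := output
    let output2 := output ++ [elem]
    let st1 := pvGoA rest output1 st
    pvGoA rest output2 st1

def get_unique_subsets (input : List Int) (output : List Int) (ans_list : List (List Int)) (hash_map : List (String × Int)) : List (List Int) :=
  (pvGoA input output (ans_list, hash_map)).1

-- ===== PORT B =====
def get_unique_subsets_alt (input : List Int) (output : List Int) (ans_list : List (List Int)) (hash_map : List (String × Int)) : List (List Int) :=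
  let subsets := input.foldl (fun acc elem => acc.flatMap (fun s => [[], [elem]].map (fun extra => s ++ extra))) [output]
  (subsets.foldl
    (fun st subset =>
      let key := PySem.Str.join "" (subset.map PySem.Int.toStr)
      if st.2.any (fun p => p.1 == key) then st
      else (st.1 ++ [subset], st.2 ++ [(key, 1)]))
    (ans_list, hash_map)).1

-- ===== PRECONDITION & SPEC =====
-- Pre_ excludes the empty input list, on which the Python A returns None (no value of the declared list type).
def Pre_get_unique_subsets (input : List Int) (output : List Int) (ans_list : List (List Int)) (hash_map : List (String × Int)) : Prop := input ≠ []
instance (input : List Int) (output : List Int) (ans_list : List (List Int)) (hash_map : List (String × Int)) : Decidable (Pre_get_unique_subsets input output ans_list hash_map) := by unfold Pre_get_unique_subsets; infer_instance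
def pvWitness_get_unique_subsets : List Int × List Int × List (List Int) × (List (String × Int)) := ([1, 2, 1], [], [], [])

def Spec_get_unique_subsets (input : List Int) (output : List Int) (ans_list : List (List Int)) (hash_map : List (String × Int)) (out : List (List Int)) : Prop := out = get_unique_subsets_alt input output ans_list hash_map
instance (input : List Int) (output : List Int) (ans_list : List (List Int)) (hash_map : List (String × Int)) (out : List (List Int)) : Decidable (Spec_get_unique_subsets input output ans_list hash_map out) := by unfold Spec_get_unique_subsets; infer_instance

-- ===== CLAIM (what is proved, stated in full; the proofs are below) =====
def Claim_equal_get_unique_subsets : Prop := ∀ (input : List Int) (output : List Int) (ans_list : List (List Int)) (hash_map : List (String × Int)), Dom_get_unique_subsets input output ans_list hash_map → Pre_get_unique_subsets input output ans_list hash_map → Spec_get_unique_subsets input output ans_list hash_map (get_unique_subsets input output ans_list hash_map)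

-- ===== LEMMAS AND PROOFS =====

-- the dedup step both ports perform, and the recursively-enumerated subset list, as proof-side names
def pvStep (st : List (List Int) × List (String × Int)) (subset : List Int) :
    List (List Int) × List (String × Int) :=
  let key := PySem.Str.join "" (subset.map PySem.Int.toStr)
  if st.2.any (fun p => p.1 == key) then st
  else (st.1 ++ [subset], st.2 ++ [(key, 1)])

def pvEnum (input : List Int) (output : List Int) : List (List Int) :=
  match input with
  | [] => [output]
  | e :: rest => pvEnum rest output ++ pvEnum rest (output ++ [e])

theorem pvGoA_eq_foldl (input : List Int) : ∀ (output : List Int) st,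
    pvGoA input output st = (pvEnum input output).foldl pvStep st := by
  induction input with
  | nil => intro output st; rfl
  | cons e rest ih =>
    intro output st
    simp only [pvGoA, pvEnum, List.foldl_append, ih]

theorem pvExpand_eq_flatMap (input : List Int) : ∀ (ps : List (List Int)),
    input.foldl (fun acc elem => acc.flatMap (fun s => [[], [elem]].map (fun extra => s ++ extra))) ps
      = ps.flatMap (pvEnum input) := by
  induction input with
  | nil => intro ps; simp [pvEnum]
  | cons e rest ih =>
    intro ps
    simp only [List.foldl_cons, ih, List.flatMap_assoc]
    apply List.flatMap_congr
    intro s _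
    simp [pvEnum]

theorem get_unique_subsets_spec : Claim_equal_get_unique_subsets := by
  intro input output ans_list hash_map _ _
  unfold Spec_get_unique_subsets get_unique_subsets get_unique_subsets_alt
  rw [pvGoA_eq_foldl, pvExpand_eq_flatMap]
  simp only [List.flatMap_cons, List.flatMap_nil, List.append_nil]
  rfl
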